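-- pv_equiv track=rewrite | github.com/havvanurkaymakci/bitirme-training | backend/aimodels/recommendations.py | get_personalized_tips
-- ===== SOURCE A (Python) =====
-- from typing import List, Dict, Any, Optional, Tuple
--
-- def get_personalized_tips(user_profile: Dict[str, Any]) -> List[Dict[str, Any]]:
--     """Kullanıcı profiline göre kişiselleştirilmiş ipuçları"""
--     tips = []
--
--     health_conditions = user_profile.get('health_conditions', [])
--     dietary_preferences = user_profile.get('dietary_preferences', [])
--     allergies = user_profile.get('allergies', [])
--
--     # Diyabet ipuçları
--     if any(cond in ['diabetes_type_1', 'diabetes_type_2', 'prediabetes']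
--            for cond in health_conditions):
--         tips.append({
--             'title': 'Diyabet Yönetimi',
--             'message': 'Ürün seçerken şeker içeriğini kontrol edin ve karbonhidrat sayımı yapın.',
--             'category': 'diabetes'
--         })
--
--     # Hipertansiyon ipuçları
--     if 'hypertension' in health_conditions:
--         tips.append({
--             'title': 'Tansiyonu Kontrol Altında Tutun',
--             'message': 'Düşük sodyumlu ürünleri tercih edin ve DASH diyeti prensiplerini uygulayın.',
--             'category': 'hypertension'
--         })
--
--     # Vegan ipuçları
--     if 'vegan' in dietary_preferences:
--         tips.append({
--             'title': 'Vegan Beslenme',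
--             'message': 'B12 vitamini ve protein kaynakları için etiketleri dikkatli okuyun.',
--             'category': 'vegan'
--         })
--
--     # Glütensiz ipuçları
--     if 'gluten_free' in dietary_preferences:
--         tips.append({
--             'title': 'Glütensiz Yaşam',
--             'message': 'Çapraz bulaşma riskine dikkat edin ve sertifikalı ürünleri tercih edin.',
--             'category': 'gluten_free'
--         })
--
--     # Alerji ipuçları
--     if allergies:
--         tips.append({
--             'title': 'Alerji Güvenliği',
--             'message': 'Her zaman etiketleri dikkatli okuyun ve şüpheli durumlarda üreticiyle iletişime geçin.',
--             'category': 'allergy_safety'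
--         })
--
--     return tips
-- ===== SOURCE B (Python) =====
-- # Single-scan re-implementation: one pass over each profile list collects the
-- # triggered tip categories into a set; tips are then emitted in fixed order.
-- _TIPS = {
--     'diabetes': {'title': 'Diyabet Yönetimi',
--                  'message': 'Ürün seçerken şeker içeriğini kontrol edin ve karbonhidrat sayımı yapın.',
--                  'category': 'diabetes'},
--     'hypertension': {'title': 'Tansiyonu Kontrol Altında Tutun',
--                      'message': 'Düşük sodyumlu ürünleri tercih edin ve DASH diyeti prensiplerini uygulayın.',
--                      'category': 'hypertension'},
--     'vegan': {'title': 'Vegan Beslenme',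
--               'message': 'B12 vitamini ve protein kaynakları için etiketleri dikkatli okuyun.',
--               'category': 'vegan'},
--     'gluten_free': {'title': 'Glütensiz Yaşam',
--                     'message': 'Çapraz bulaşma riskine dikkat edin ve sertifikalı ürünleri tercih edin.',
--                     'category': 'gluten_free'},
--     'allergy_safety': {'title': 'Alerji Güvenliği',
--                        'message': 'Her zaman etiketleri dikkatli okuyun ve şüpheli durumlarda üreticiyle iletişime geçin.',
--                        'category': 'allergy_safety'},
-- }
-- _ORDER = ['diabetes', 'hypertension', 'vegan', 'gluten_free', 'allergy_safety']
--
-- def get_personalized_tips(user_profile):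
--     triggered = set()
--     for cond in user_profile.get('health_conditions', []):
--         if cond in ('diabetes_type_1', 'diabetes_type_2', 'prediabetes'):
--             triggered.add('diabetes')
--         elif cond == 'hypertension':
--             triggered.add('hypertension')
--     for pref in user_profile.get('dietary_preferences', []):
--         if pref in ('vegan', 'gluten_free'):
--             triggered.add(pref)
--     if user_profile.get('allergies', []):
--         triggered.add('allergy_safety')
--     return [dict(_TIPS[cat]) for cat in _ORDER if cat in triggered]
-- ===== Notes on version B (the rewrite author's own statement) =====
-- stated objective: alternative
-- what changed: Instead of five independent membership tests over the profile lists, B makes a single classifying pass over each list accumulating the triggered tip categories into a set, then emits the tip dicts for the triggered categories in a fixed canonical order.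
import Mathlib
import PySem

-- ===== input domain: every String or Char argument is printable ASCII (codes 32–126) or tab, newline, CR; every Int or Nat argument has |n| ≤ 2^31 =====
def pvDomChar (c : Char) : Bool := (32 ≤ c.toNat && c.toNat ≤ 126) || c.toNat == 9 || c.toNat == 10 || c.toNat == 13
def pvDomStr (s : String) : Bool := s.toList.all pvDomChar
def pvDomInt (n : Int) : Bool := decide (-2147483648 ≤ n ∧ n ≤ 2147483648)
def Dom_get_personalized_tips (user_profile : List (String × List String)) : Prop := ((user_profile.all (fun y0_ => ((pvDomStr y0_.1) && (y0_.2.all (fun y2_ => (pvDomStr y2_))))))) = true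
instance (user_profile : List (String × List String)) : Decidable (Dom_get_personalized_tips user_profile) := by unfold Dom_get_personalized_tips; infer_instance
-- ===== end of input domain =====

-- B replaces A's five independent membership tests with a single classifying pass over each
-- profile list that accumulates triggered tip categories into a set, emitted in fixed order;
-- objective: alternative.

-- ===== PORT A =====
def get_personalized_tips (user_profile : List (String × List String)) : List (List (String × String)) :=
  let tips : List (List (String × String)) := []
  let health_conditions := PySem.Dict.getD (PySem.Dict.mk user_profile) "health_conditions" []
  let dietary_preferences := PySem.Dict.getD (PySem.Dict.mk user_profile) "dietary_preferences" []
  let allergies := PySem.Dict.getD (PySem.Dict.mk user_profile) "allergies" []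
  let tips := if health_conditions.any
      (fun cond => ["diabetes_type_1", "diabetes_type_2", "prediabetes"].contains cond) then
    tips ++ [[("title", "Diyabet Yönetimi"),
              ("message", "Ürün seçerken şeker içeriğini kontrol edin ve karbonhidrat sayımı yapın."),
              ("category", "diabetes")]]
  else tips
  let tips := if health_conditions.contains "hypertension" then
    tips ++ [[("title", "Tansiyonu Kontrol Altında Tutun"),
              ("message", "Düşük sodyumlu ürünleri tercih edin ve DASH diyeti prensiplerini uygulayın."),
              ("category", "hypertension")]]
  else tips
  let tips := if dietary_preferences.contains "vegan" then
    tips ++ [[("title", "Vegan Beslenme"),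
              ("message", "B12 vitamini ve protein kaynakları için etiketleri dikkatli okuyun."),
              ("category", "vegan")]]
  else tips
  let tips := if dietary_preferences.contains "gluten_free" then
    tips ++ [[("title", "Glütensiz Yaşam"),
              ("message", "Çapraz bulaşma riskine dikkat edin ve sertifikalı ürünleri tercih edin."),
              ("category", "gluten_free")]]
  else tips
  let tips := if !allergies.isEmpty then
    tips ++ [[("title", "Alerji Güvenliği"),
              ("message", "Her zaman etiketleri dikkatli okuyun ve şüpheli durumlarda üreticiyle iletişime geçin."),
              ("category", "allergy_safety")]]
  else tips
  tips

-- ===== PORT B =====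
-- the tips table of Source B
def pvTip (cat : String) : List (String × String) :=
  if cat = "diabetes" then
    [("title", "Diyabet Yönetimi"),
     ("message", "Ürün seçerken şeker içeriğini kontrol edin ve karbonhidrat sayımı yapın."),
     ("category", "diabetes")]
  else if cat = "hypertension" then
    [("title", "Tansiyonu Kontrol Altında Tutun"),
     ("message", "Düşük sodyumlu ürünleri tercih edin ve DASH diyeti prensiplerini uygulayın."),
     ("category", "hypertension")]
  else if cat = "vegan" then
    [("title", "Vegan Beslenme"),
     ("message", "B12 vitamini ve protein kaynakları için etiketleri dikkatli okuyun."),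
     ("category", "vegan")]
  else if cat = "gluten_free" then
    [("title", "Glütensiz Yaşam"),
     ("message", "Çapraz bulaşma riskine dikkat edin ve sertifikalı ürünleri tercih edin."),
     ("category", "gluten_free")]
  else
    [("title", "Alerji Güvenliği"),
     ("message", "Her zaman etiketleri dikkatli okuyun ve şüpheli durumlarda üreticiyle iletişime geçin."),
     ("category", "allergy_safety")]

def pvOrder : List String := ["diabetes", "hypertension", "vegan", "gluten_free", "allergy_safety"]

-- body of Source B's first for-loop (over health_conditions)
def pvScanHealth (s : PySem.Set String) (cond : String) : PySem.Set String :=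
  if ["diabetes_type_1", "diabetes_type_2", "prediabetes"].contains cond then
    PySem.Set.add s "diabetes"
  else if cond = "hypertension" then
    PySem.Set.add s "hypertension"
  else s

-- body of Source B's second for-loop (over dietary_preferences)
def pvScanDiet (s : PySem.Set String) (pref : String) : PySem.Set String :=
  if ["vegan", "gluten_free"].contains pref then PySem.Set.add s pref else s

def get_personalized_tips_alt (user_profile : List (String × List String)) : List (List (String × String)) :=
  let hc := PySem.Dict.getD (PySem.Dict.mk user_profile) "health_conditions" []
  let dp := PySem.Dict.getD (PySem.Dict.mk user_profile) "dietary_preferences" []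
  let al := PySem.Dict.getD (PySem.Dict.mk user_profile) "allergies" []
  let triggered := hc.foldl pvScanHealth PySem.Set.empty
  let triggered := dp.foldl pvScanDiet triggered
  let triggered := if !al.isEmpty then PySem.Set.add triggered "allergy_safety" else triggered
  (pvOrder.filter (fun cat => PySem.Set.contains triggered cat)).map pvTip

-- ===== PRECONDITION & SPEC =====
def Spec_get_personalized_tips (user_profile : List (String × List String)) (out : List (List (String × String))) : Prop := out = get_personalized_tips_alt user_profile
instance (user_profile : List (String × List String)) (out : List (List (String × String))) : Decidable (Spec_get_personalized_tips user_profile out) := by unfold Spec_get_personalized_tips; infer_instance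

-- ===== CLAIM (what is proved, stated in full; the proofs are below) =====
def Claim_equal_get_personalized_tips : Prop := ∀ (user_profile : List (String × List String)), Dom_get_personalized_tips user_profile → Spec_get_personalized_tips user_profile (get_personalized_tips user_profile)

-- ===== LEMMAS AND PROOFS =====

lemma mem_scanHealth_diabetes (hc : List String) (acc : PySem.Set String) :
    "diabetes" ∈ hc.foldl pvScanHealth acc ↔
      "diabetes" ∈ acc ∨ ∃ c ∈ hc, c = "diabetes_type_1" ∨ c = "diabetes_type_2" ∨ c = "prediabetes" := by
  induction hc generalizing acc with
  | nil => simp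
  | cons c cs ih =>
    simp only [List.foldl_cons, pvScanHealth]
    split_ifs with h1 h2 <;>
      simp only [ih, PySem.Set.mem_add, List.mem_cons] <;> simp at h1 ⊢ <;> aesop

lemma mem_scanHealth_hypertension (hc : List String) (acc : PySem.Set String) :
    "hypertension" ∈ hc.foldl pvScanHealth acc ↔
      "hypertension" ∈ acc ∨ "hypertension" ∈ hc := by
  induction hc generalizing acc with
  | nil => simp
  | cons c cs ih =>
    simp only [List.foldl_cons, pvScanHealth]
    split_ifs with h1 h2 <;>
      simp only [ih, PySem.Set.mem_add, List.mem_cons] <;> simp at h1 ⊢ <;> aesop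

lemma mem_scanHealth_other (hc : List String) (acc : PySem.Set String) (x : String)
    (hd : x ≠ "diabetes") (hh : x ≠ "hypertension") :
    x ∈ hc.foldl pvScanHealth acc ↔ x ∈ acc := by
  induction hc generalizing acc with
  | nil => simp
  | cons c cs ih =>
    simp only [List.foldl_cons, pvScanHealth]
    split_ifs with h1 h2 <;> simp [ih, PySem.Set.mem_add, hd, hh]

lemma mem_scanDiet (dp : List String) (acc : PySem.Set String) (x : String) :
    x ∈ dp.foldl pvScanDiet acc ↔
      x ∈ acc ∨ ((x = "vegan" ∨ x = "gluten_free") ∧ x ∈ dp) := by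
  induction dp generalizing acc with
  | nil => simp
  | cons p ps ih =>
    simp only [List.foldl_cons, pvScanDiet]
    split_ifs with h1 <;> simp only [ih, PySem.Set.mem_add, List.mem_cons] <;>
      simp at h1 <;> by_cases hx : x = p <;> aesop

-- ===== VERDICT (by name: the statement is the Claim_ definition above) =====
set_option maxHeartbeats 1000000 in
theorem get_personalized_tips_spec : Claim_equal_get_personalized_tips := by
  intro up _
  unfold Spec_get_personalized_tips
  show get_personalized_tips up = get_personalized_tips_alt up
  simp only [get_personalized_tips, get_personalized_tips_alt]
  set hc := PySem.Dict.getD (PySem.Dict.mk up) "health_conditions" [] with hhc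
  set dp := PySem.Dict.getD (PySem.Dict.mk up) "dietary_preferences" [] with hdp
  set al := PySem.Dict.getD (PySem.Dict.mk up) "allergies" [] with hal
  set T1 := hc.foldl pvScanHealth PySem.Set.empty with hT1
  set T2 := dp.foldl pvScanDiet T1 with hT2
  set T := if !al.isEmpty then PySem.Set.add T2 "allergy_safety" else T2 with hT
  have m1 : PySem.Set.contains T "diabetes" =
      hc.any (fun cond => ["diabetes_type_1", "diabetes_type_2", "prediabetes"].contains cond) := by
    rw [Bool.eq_iff_iff]
    simp only [PySem.Set.contains_iff, hT, hT2, hT1]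
    split_ifs <;>
      simp [PySem.Set.mem_add, mem_scanDiet, mem_scanHealth_diabetes, List.any_eq_true]
  have m2 : PySem.Set.contains T "hypertension" = hc.contains "hypertension" := by
    rw [Bool.eq_iff_iff]
    simp only [PySem.Set.contains_iff, hT, hT2, hT1]
    split_ifs <;>
      simp [PySem.Set.mem_add, mem_scanDiet, mem_scanHealth_hypertension]
  have m3 : PySem.Set.contains T "vegan" = dp.contains "vegan" := by
    rw [Bool.eq_iff_iff]
    simp only [PySem.Set.contains_iff, hT, hT2, hT1]
    split_ifs <;>
      simp [mem_scanDiet, mem_scanHealth_other]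
  have m4 : PySem.Set.contains T "gluten_free" = dp.contains "gluten_free" := by
    rw [Bool.eq_iff_iff]
    simp only [PySem.Set.contains_iff, hT, hT2, hT1]
    split_ifs <;>
      simp [mem_scanDiet, mem_scanHealth_other]
  have m5 : PySem.Set.contains T "allergy_safety" = !al.isEmpty := by
    rw [Bool.eq_iff_iff]
    simp only [PySem.Set.contains_iff, hT, hT2, hT1]
    split_ifs with h <;>
      simp [mem_scanDiet, mem_scanHealth_other, h, PySem.Set.empty]
  simp only [pvOrder, List.filter_cons, List.filter_nil, m1, m2, m3, m4, m5]
  cases h1 : hc.any (fun cond => ["diabetes_type_1", "diabetes_type_2", "prediabetes"].contains cond) <;>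
    cases h2 : hc.contains "hypertension" <;>
    cases h3 : dp.contains "vegan" <;>
    cases h4 : dp.contains "gluten_free" <;>
    cases h5 : al.isEmpty <;>
    simp [h5, pvTip]
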